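-- pv_equiv track=rewrite | github.com/maxpoletto/advent-of-code | 2016/day13.py | num_locs
-- ===== SOURCE A (Python) =====
-- from collections import deque
-- from typing import Tuple
--
-- magic = 1364
--
-- wall = {}
--
-- def is_wall(p: Tuple) -> bool:
--     if p in wall.keys():
--         return wall[p]
--     if p[0] < 0 or p[1] < 0:
--         return True
--     n = p[0]*(p[0] + 3 + 2*p[1]) + p[1]*(1 + p[1]) + magic
--     o = bin(n).count('1')
--     wall[p] = (o%2)==1
--     return (o%2)==1
--
-- def num_locs(p0, n) -> int:
--     visited = {}
--     q = deque()
--     q.append((p0, 0))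
--     while len(q) > 0:
--         p, s = q.popleft()
--         visited[p] = True
--         if s == n:
--             continue
--         for d in [ (-1,0), (1,0), (0,-1), (0,1)]:
--             np = (p[0]+d[0], p[1]+d[1])
--             if not is_wall(np) and not np in visited.keys():
--                 q.append((np, s+1))
--     return len(visited)
-- ===== SOURCE B (Python) =====
-- # Depth-first search with an explicit stack and shortest-depth relabelling
-- # (cells may be re-expanded when found at a smaller depth), instead of A's
-- # FIFO breadth-first queue; the final label table's size is the answer.
-- magic = 1364
--
-- def _open(x, y):
--     if x < 0 or y < 0:
--         return False
--     return bin(x*x + 3*x + 2*x*y + y + y*y + magic).count('1') % 2 == 0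
--
-- def num_locs(p0, n) -> int:
--     dist = {}
--     stack = [(p0, 0)]
--     while stack:
--         p, s = stack.pop()
--         if p in dist and dist[p] <= s:
--             continue
--         dist[p] = s
--         if s < n:
--             x, y = p[0], p[1]
--             for q in ((x - 1, y), (x + 1, y), (x, y - 1), (x, y + 1)):
--                 if _open(q[0], q[1]):
--                     stack.append((q, s + 1))
--     return len(dist)
-- ===== Notes on version B (the rewrite author's own statement) =====
-- stated objective: alternative
-- what changed: Replaces A's FIFO breadth-first queue (level-order, deduplicated only at pop time) by a depth-first explicit stack with shortest-depth relabelling: cells carry a distance label and are re-expanded whenever reached at a strictly smaller depth, and the size of the final label table is returned.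
-- outside the precondition, e.g. on num_locs((1, 1), -1): A returns 457, B returns 1; on num_locs((3,), 5): A raises IndexError, B raises IndexError
import Mathlib
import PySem

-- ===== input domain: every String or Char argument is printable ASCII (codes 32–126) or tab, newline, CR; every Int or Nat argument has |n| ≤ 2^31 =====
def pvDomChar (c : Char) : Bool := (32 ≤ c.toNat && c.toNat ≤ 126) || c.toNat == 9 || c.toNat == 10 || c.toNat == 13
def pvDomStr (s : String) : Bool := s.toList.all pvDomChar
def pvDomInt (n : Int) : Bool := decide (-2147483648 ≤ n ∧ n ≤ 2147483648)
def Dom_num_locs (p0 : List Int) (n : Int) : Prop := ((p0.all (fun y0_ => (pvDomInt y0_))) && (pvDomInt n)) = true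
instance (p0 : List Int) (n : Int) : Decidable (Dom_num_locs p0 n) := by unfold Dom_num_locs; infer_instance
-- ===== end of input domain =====

-- B replaces A's FIFO breadth-first queue by a depth-first explicit stack with
-- shortest-depth relabelling (a cell may be re-expanded when reached at a smaller
-- depth); the size of the final label table is the answer.
-- A mutates the module-level memo dict 'wall'; that cache only stores a pure
-- computation and does not affect the return value, so it is dropped in the ports.

-- ===== PORT A =====

-- bin(m).count('1') for a nonnegative m
def pvPopcount : Nat → Nat
  | 0 => 0
  | (m+1) => (m+1) % 2 + pvPopcount ((m+1)/2)

-- is_wall(p): the global memo 'wall' caches a pure computation, so it is inlined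
def pv_is_wall (p : List Int) : Bool :=
  match p with
  | x :: y :: _ =>
    if x < 0 ∨ y < 0 then true
    else pvPopcount (x*(x + 3 + 2*y) + y*(1 + y) + 1364).toNat % 2 == 1
  | _ => false   -- p[0] raises IndexError in Python; unreachable under Pre_num_locs

-- np = (p[0]+d[0], p[1]+d[1]) for d in [(-1,0),(1,0),(0,-1),(0,1)]
def pvNbrsA (p : List Int) : List (List Int) :=
  match p with
  | x :: y :: _ => [((-1 : Int), (0 : Int)), (1, 0), (0, -1), (0, 1)].map
      (fun d => [x + d.1, y + d.2])
  | _ => []   -- p[0] raises IndexError in Python; unreachable under Pre_num_locs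

-- queue-entry weight: bounds the number of loop iterations an entry can still cause
def pvW (n : Int) (e : List Int × Int) : Nat := 5 ^ ((n - e.2).toNat)

def pvQW (n : Int) (q : List (List Int × Int)) : Nat := (q.map (pvW n)).sum

theorem pvQW_tail_lt (n : Int) (p : List Int) (s : Int) (q : List (List Int × Int)) :
    pvQW n q < pvQW n ((p, s) :: q) := by
  simp only [pvQW, List.map_cons, List.sum_cons, pvW]
  have : 0 < 5 ^ ((n - s).toNat) := pow_pos (by norm_num : (0:Nat) < 5) _
  omega

theorem pvQW_push_lt (n : Int) (p : List Int) (s : Int) (q : List (List Int × Int))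
    (hs : ¬ n ≤ s) (pushes : List (List Int × Int))
    (hlen : pushes.length ≤ 4) (hsnd : ∀ e ∈ pushes, e.2 = s + 1) :
    pvQW n (q ++ pushes) < pvQW n ((p, s) :: q) := by
  have hk : (n - s).toNat = (n - (s+1)).toNat + 1 := by omega
  have hb : ∀ x ∈ pushes.map (pvW n), x ≤ 5 ^ ((n - (s+1)).toNat) := by
    intro x hx
    rcases List.mem_map.1 hx with ⟨e, he, rfl⟩
    simp [pvW, hsnd e he]
  have hsum : (pushes.map (pvW n)).sum ≤ pushes.length * 5 ^ ((n - (s+1)).toNat) := by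
    calc (pushes.map (pvW n)).sum
        ≤ (pushes.map (pvW n)).length * 5 ^ ((n - (s+1)).toNat) :=
          List.sum_le_card_nsmul _ _ hb
      _ = pushes.length * 5 ^ ((n - (s+1)).toNat) := by simp
  have hpow : 0 < 5 ^ ((n - (s+1)).toNat) := pow_pos (by norm_num : (0:Nat) < 5) _
  simp only [pvQW, List.map_append, List.sum_append, List.map_cons, List.sum_cons, pvW, hk,
    pow_succ]
  have h4 : pushes.length * 5 ^ ((n - (s+1)).toNat) ≤ 4 * 5 ^ ((n - (s+1)).toNat) :=
    Nat.mul_le_mul_right _ hlen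
  omega

-- the while loop: pop left; visited[p] = True; if s == n: continue; else enqueue
-- the open, not-yet-visited neighbours with step s+1.  (The test 'n ≤ s' equals
-- Python's 's == n' on every reachable state when 0 ≤ n — enqueued steps never
-- exceed n — and doubles as the totality guard for the recursion.)
def pvLoopA (n : Int) (visited : PySem.Dict (List Int) Bool) (q : List (List Int × Int)) :
    PySem.Dict (List Int) Bool :=
  match q with
  | [] => visited
  | (p, s) :: q' =>
    let visited' := visited.insert p true
    if n ≤ s then pvLoopA n visited' q'
    else
      pvLoopA n visited'
        (q' ++ (pvNbrsA p).filterMap (fun np =>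
          if ¬ pv_is_wall np = true ∧ ¬ visited'.contains np = true
          then some (np, s + 1) else none))
termination_by pvQW n q
decreasing_by
  · exact pvQW_tail_lt n p s q'
  · apply pvQW_push_lt n p s q' (by assumption)
    · calc ((pvNbrsA p).filterMap _).length ≤ (pvNbrsA p).length :=
            List.length_filterMap_le _ _
        _ ≤ 4 := by unfold pvNbrsA; cases p with
            | nil => simp
            | cons x t => cases t with
              | nil => simp
              | cons y t' => simp
    · intro e he
      rcases List.mem_filterMap.1 he with ⟨np, _, hnp⟩
      simp at hnp
      rw [← hnp.2]

def num_locs (p0 : List Int) (n : Int) : Int :=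
  ((pvLoopA n PySem.Dict.empty [(p0, 0)]).size : Int)   -- return len(visited)

-- ===== PORT B =====

-- _open(x, y)
def pv_open (x y : Int) : Bool :=
  if x < 0 ∨ y < 0 then false
  else pvPopcount (x*x + 3*x + 2*x*y + y + y*y + 1364).toNat % 2 == 0

-- the four candidate tuples (x±1, y), (x, y±1); x, y = p[0], p[1]
def pvNbrsB (p : List Int) : List (List Int) :=
  match p with
  | x :: y :: _ => [[x - 1, y], [x + 1, y], [x, y - 1], [x, y + 1]]
  | _ => []   -- p[0] raises IndexError in Python; unreachable under Pre_num_locs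

-- _open(q[0], q[1]) on a candidate cell
def pvOpenCell (c : List Int) : Bool :=
  match c with
  | x :: y :: _ => pv_open x y
  | _ => false

-- the open candidates pushed (in Python order) when p is expanded at depth s
def pvPushes (p : List Int) (s : Int) : List (List Int × Int) :=
  ((pvNbrsB p).filter (fun q => pvOpenCell q)).map (fun q => (q, s + 1))

theorem pvQW_push_lt' (n : Int) (p : List Int) (s : Int) (q : List (List Int × Int))
    (hs : s < n) (pushes : List (List Int × Int))
    (hlen : pushes.length ≤ 4) (hsnd : ∀ e ∈ pushes, e.2 = s + 1) :
    pvQW n (pushes ++ q) < pvQW n ((p, s) :: q) := by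
  have h := pvQW_push_lt n p s q (by omega) pushes hlen hsnd
  simp only [pvQW, List.map_append, List.sum_append] at h ⊢
  omega

-- the while loop of B: stack.pop() is the list head (the Python list's tail),
-- so the four candidates appended in order are consed REVERSED on top.
def pvLoopB (n : Int) (dist : PySem.Dict (List Int) Int) (stack : List (List Int × Int)) :
    PySem.Dict (List Int) Int :=
  match stack with
  | [] => dist
  | (p, s) :: st =>
    if dist.contains p = true ∧ dist.getD p 0 ≤ s then pvLoopB n dist st
    else
      let dist' := dist.insert p s
      if s < n then pvLoopB n dist' ((pvPushes p s).reverse ++ st)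
      else pvLoopB n dist' st
termination_by pvQW n stack
decreasing_by
  · exact pvQW_tail_lt n p s st
  · apply pvQW_push_lt' n p s st (by assumption)
    · calc ((pvPushes p s).reverse).length = ((pvNbrsB p).filter (fun q => pvOpenCell q)).length := by
            simp [pvPushes]
        _ ≤ (pvNbrsB p).length := List.length_filter_le _ _
        _ ≤ 4 := by unfold pvNbrsB; cases p with
            | nil => simp
            | cons x t => cases t with
              | nil => simp
              | cons y t' => simp
    · intro e he
      rw [List.mem_reverse] at he
      rcases List.mem_map.1 he with ⟨c, _, rfl⟩
      rfl
  · exact pvQW_tail_lt n p s st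

def num_locs_alt (p0 : List Int) (n : Int) : Int :=
  ((pvLoopB n PySem.Dict.empty [(p0, 0)]).size : Int)   -- return len(dist)

-- ===== PRECONDITION & SPEC =====

-- Pre_ excludes (i) negative n: Python A's 's == n' cutoff never fires there, so A
-- accidentally explores the entire enclosed open component (diverging if it is
-- infinite) while B's 's < n' gate returns 1 — a degenerate corner outside the
-- function's domain (n is a step budget) that no caller would specify; and
-- (ii) p0 with fewer than two coordinates when n ≠ 0, where Python A raises IndexError.
def Pre_num_locs (p0 : List Int) (n : Int) : Prop := 0 ≤ n ∧ (2 ≤ p0.length ∨ n = 0)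
instance (p0 : List Int) (n : Int) : Decidable (Pre_num_locs p0 n) := by
  unfold Pre_num_locs; infer_instance

def pvWitness_num_locs : List Int × Int := ([1, 1], 3)

def Spec_num_locs (p0 : List Int) (n : Int) (out : Int) : Prop := out = num_locs_alt p0 n
instance (p0 : List Int) (n : Int) (out : Int) : Decidable (Spec_num_locs p0 n out) := by
  unfold Spec_num_locs; infer_instance

-- ===== CLAIM (what is proved, stated in full; the proofs are below) =====
def Claim_equal_num_locs : Prop := ∀ (p0 : List Int) (n : Int), Dom_num_locs p0 n → Pre_num_locs p0 n → Spec_num_locs p0 n (num_locs p0 n)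

-- ===== LEMMAS AND PROOFS =====

-- the two ports generate the same candidate list
theorem pvNbrsA_eq (p : List Int) : pvNbrsA p = pvNbrsB p := by
  unfold pvNbrsA pvNbrsB
  cases p with
  | nil => rfl
  | cons x t => cases t with
    | nil => rfl
    | cons y t' => simp; constructor <;> ring

-- on actual cells the two wall tests are complementary
theorem pv_is_wall_eq (x y : Int) (r : List Int) :
    pv_is_wall (x :: y :: r) = !pvOpenCell (x :: y :: r) := by
  unfold pv_is_wall pvOpenCell pv_open
  by_cases h : x < 0 ∨ y < 0
  · simp [h]
  · have harg : x*(x + 3 + 2*y) + y*(1 + y) = x*x + 3*x + 2*x*y + y + y*y := by ring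
    simp only [h, if_false, harg]
    rcases Nat.mod_two_eq_zero_or_one (pvPopcount (x*x + 3*x + 2*x*y + y + y*y + 1364).toNat)
      with h2 | h2 <;> simp [h2]

-- cells reachable from p within k steps through open cells (p itself always counts)
def pvReach (p : List Int) : Nat → List Int → Prop
  | 0 => fun c => c = p
  | k+1 => fun c => pvReach p k c ∨
      (pvOpenCell c = true ∧ ∃ b, pvReach p k b ∧ c ∈ pvNbrsB b)

theorem pvReach_mono {p : List Int} {k l : Nat} (h : k ≤ l) {c : List Int}
    (hc : pvReach p k c) : pvReach p l c := by
  induction l with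
  | zero => exact (Nat.le_zero.mp h ▸ hc)
  | succ l ih =>
    rcases Nat.lt_or_ge k (l+1) with hl | hl
    · exact Or.inl (ih (by omega))
    · have : k = l + 1 := by omega
      exact this ▸ hc

-- membership in the pushed-candidates list
theorem pvPushes_mem {p : List Int} {s : Int} {e : List Int × Int} :
    e ∈ pvPushes p s ↔ e.1 ∈ pvNbrsB p ∧ pvOpenCell e.1 = true ∧ e.2 = s + 1 := by
  unfold pvPushes
  constructor
  · intro he
    rcases List.mem_map.1 he with ⟨c, hc, rfl⟩
    rcases List.mem_filter.1 hc with ⟨h1, h2⟩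
    exact ⟨h1, by simpa using h2, rfl⟩
  · rintro ⟨h1, h2, h3⟩
    refine List.mem_map.2 ⟨e.1, List.mem_filter.2 ⟨h1, by simpa using h2⟩, ?_⟩
    cases e with
    | mk a b => simp at h3 ⊢; omega

theorem pvLoopB_nil (n : Int) (V : PySem.Dict (List Int) Int) :
    pvLoopB n V [] = V := by
  simp [pvLoopB]

theorem pvLoopB_cons (n : Int) (V : PySem.Dict (List Int) Int) (p : List Int) (s : Int)
    (st : List (List Int × Int)) :
    pvLoopB n V ((p, s) :: st) =
      if V.contains p = true ∧ V.getD p 0 ≤ s then pvLoopB n V st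
      else if s < n then pvLoopB n (V.insert p s) ((pvPushes p s).reverse ++ st)
      else pvLoopB n (V.insert p s) st := by
  rw [pvLoopB]

-- B's invariant-preservation lemma: from a state whose label table and stack
-- satisfy the DFS invariants, the final table is sound (labels are path lengths),
-- closed under open-neighbour expansion below depth n, and labels p0 with 0.
theorem pvLoopB_spec (p0 : List Int) (n : Int) :
    ∀ (M : Nat) (V : PySem.Dict (List Int) Int) (st : List (List Int × Int)),
    pvQW n st < M →
    V.keys.Nodup →
    (∀ c v, V.get? c = some v → 0 ≤ v ∧ v ≤ n ∧ pvReach p0 v.toNat c) →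
    (∀ e ∈ st, 0 ≤ e.2 ∧ e.2 ≤ n ∧ pvReach p0 e.2.toNat e.1) →
    (∀ c v, V.get? c = some v → v < n → ∀ d, pvOpenCell d = true → d ∈ pvNbrsB c →
      (∃ w, V.get? d = some w ∧ w ≤ v + 1) ∨ (∃ t, (d, t) ∈ st ∧ t ≤ v + 1)) →
    (V.get? p0 = some 0 ∨ (p0, (0 : Int)) ∈ st) →
    (pvLoopB n V st).keys.Nodup ∧
    (∀ c v, (pvLoopB n V st).get? c = some v → 0 ≤ v ∧ v ≤ n ∧ pvReach p0 v.toNat c) ∧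
    (∀ c v, (pvLoopB n V st).get? c = some v → v < n →
      ∀ d, pvOpenCell d = true → d ∈ pvNbrsB c →
        ∃ w, (pvLoopB n V st).get? d = some w ∧ w ≤ v + 1) ∧
    (pvLoopB n V st).get? p0 = some 0 := by
  intro M
  induction M with
  | zero => intro V st h; omega
  | succ M ih =>
    intro V st hM hK h1 h2 h3 h4
    obtain _ | ⟨⟨p, s⟩, st⟩ := st
    · rw [pvLoopB_nil]
      refine ⟨hK, h1, ?_, ?_⟩
      · intro c v hc hvn d hop hnb
        rcases h3 c v hc hvn d hop hnb with ⟨w, hw⟩ | ⟨t, ht, _⟩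
        · exact ⟨w, hw⟩
        · simp at ht
      · rcases h4 with h | h
        · exact h
        · simp at h
    · obtain ⟨hs0, hsn, hrp⟩ := h2 (p, s) List.mem_cons_self
      rw [pvLoopB_cons]
      split_ifs with hskip hlt
      · -- skip: p is already labelled with a value ≤ s
        obtain ⟨hcont, hle⟩ := hskip
        have hvs : (V.get? p).isSome := by
          rw [← PySem.Dict.contains_eq_isSome_get? V p]; exact hcont
        obtain ⟨v, hv⟩ := Option.isSome_iff_exists.1 hvs
        have hgd : V.getD p 0 = v := PySem.Dict.getD_of_get?_eq_some V 0 hv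
        have hvle : v ≤ s := by rw [hgd] at hle; exact hle
        apply ih V st (by have := pvQW_tail_lt n p s st; omega) hK h1
          (fun e he => h2 e (List.mem_cons_of_mem _ he)) ?_ ?_
        · intro c w hc hwn d hop hnb
          rcases h3 c w hc hwn d hop hnb with ⟨u, hu⟩ | ⟨t, ht, htle⟩
          · exact Or.inl ⟨u, hu⟩
          · rcases List.mem_cons.1 ht with heq | ht'
            · have hd : d = p := congrArg Prod.fst heq
              have hts : t = s := congrArg Prod.snd heq
              exact Or.inl ⟨v, hd ▸ hv, by omega⟩
            · exact Or.inr ⟨t, ht', htle⟩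
        · rcases h4 with h | h
          · exact Or.inl h
          · rcases List.mem_cons.1 h with heq | h'
            · have hp : p0 = p := congrArg Prod.fst heq
              have hs : (0 : Int) = s := congrArg Prod.snd heq
              have h0v := (h1 p v hv).1
              have : v = 0 := by omega
              exact Or.inl (by rw [hp]; rw [hv, this])
            · exact Or.inr h'
      · -- relabel p with s and push its open neighbours (s < n)
        have hfresh : ∀ w, V.get? p = some w → s < w := by
          intro w hw
          by_contra hcon
          apply hskip
          constructor
          · rw [PySem.Dict.contains_eq_isSome_get?, hw]; rfl
          · rw [PySem.Dict.getD_of_get?_eq_some V 0 hw]; omega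
        have hget' : ∀ c, (V.insert p s).get? c = if c = p then some s else V.get? c :=
          fun c => PySem.Dict.get?_insert _ _ _ _
        have hK' := PySem.Dict.nodup_keys_insert V p s hK
        have h1' : ∀ c v, (V.insert p s).get? c = some v →
            0 ≤ v ∧ v ≤ n ∧ pvReach p0 v.toNat c := by
          intro c v hc
          rw [hget' c] at hc
          by_cases hcp : c = p
          · rw [if_pos hcp] at hc
            cases hc
            exact ⟨hs0, hsn, hcp ▸ hrp⟩
          · rw [if_neg hcp] at hc
            exact h1 c v hc
        have hmempush : ∀ d : List Int, pvOpenCell d = true → d ∈ pvNbrsB p →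
            (d, s + 1) ∈ (pvPushes p s).reverse ++ st := by
          intro d hop hnb
          exact List.mem_append_left _ (List.mem_reverse.2 (pvPushes_mem.2 ⟨hnb, hop, rfl⟩))
        apply ih (V.insert p s) ((pvPushes p s).reverse ++ st) ?_ hK' h1' ?_ ?_ ?_
        · -- measure
          have hlen : ((pvPushes p s).reverse).length ≤ 4 := by
            calc ((pvPushes p s).reverse).length
                = ((pvNbrsB p).filter (fun q => pvOpenCell q)).length := by simp [pvPushes]
              _ ≤ (pvNbrsB p).length := List.length_filter_le _ _
              _ ≤ 4 := by unfold pvNbrsB; cases p with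
                  | nil => simp
                  | cons x t => cases t with
                    | nil => simp
                    | cons y t' => simp
          have hsnd : ∀ e ∈ (pvPushes p s).reverse, e.2 = s + 1 := by
            intro e he
            rw [List.mem_reverse] at he
            exact (pvPushes_mem.1 he).2.2
          have := pvQW_push_lt' n p s st hlt _ hlen hsnd
          omega
        · -- stack entries stay in range and reachable
          intro e he
          rcases List.mem_append.1 he with h | h
          · rw [List.mem_reverse] at h
            obtain ⟨hnb, hop, hsnd⟩ := pvPushes_mem.1 h
            refine ⟨by omega, by omega, ?_⟩
            have hidx : e.2.toNat = s.toNat + 1 := by omega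
            rw [hidx]
            exact Or.inr ⟨hop, p, hrp, hnb⟩
          · exact h2 e (List.mem_cons_of_mem _ h)
        · -- expansion invariant
          intro c v hc hvn d hop hnb
          rw [hget' c] at hc
          by_cases hcp : c = p
          · rw [if_pos hcp] at hc
            cases hc
            exact Or.inr ⟨s + 1, hmempush d hop (hcp ▸ hnb), by omega⟩
          · rw [if_neg hcp] at hc
            rcases h3 c v hc hvn d hop hnb with ⟨w, hw, hwle⟩ | ⟨t, ht, htle⟩
            · by_cases hdp : d = p
              · have := hfresh w (hdp ▸ hw)
                refine Or.inl ⟨s, ?_, by omega⟩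
                rw [hget' d, if_pos hdp]
              · exact Or.inl ⟨w, by rw [hget' d, if_neg hdp]; exact hw, hwle⟩
            · rcases List.mem_cons.1 ht with heq | ht'
              · have hd : d = p := congrArg Prod.fst heq
                have hts : t = s := congrArg Prod.snd heq
                refine Or.inl ⟨s, ?_, by omega⟩
                rw [hget' d, if_pos hd]
              · exact Or.inr ⟨t, List.mem_append_right _ ht', htle⟩
        · -- p0 invariant
          rcases h4 with h | h
          · by_cases hpp : p = p0
            · have := hfresh 0 (hpp ▸ h)
              omega
            · exact Or.inl (by rw [hget' p0, if_neg (fun he => hpp he.symm)]; exact h)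
          · rcases List.mem_cons.1 h with heq | h'
            · have hp : p0 = p := congrArg Prod.fst heq
              have hs : (0 : Int) = s := congrArg Prod.snd heq
              exact Or.inl (by rw [hget' p0, if_pos hp, ← hs])
            · exact Or.inr (List.mem_append_right _ h')
      · -- relabel p with s, no pushes (s = n here)
        have hfresh : ∀ w, V.get? p = some w → s < w := by
          intro w hw
          by_contra hcon
          apply hskip
          constructor
          · rw [PySem.Dict.contains_eq_isSome_get?, hw]; rfl
          · rw [PySem.Dict.getD_of_get?_eq_some V 0 hw]; omega
        have hget' : ∀ c, (V.insert p s).get? c = if c = p then some s else V.get? c :=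
          fun c => PySem.Dict.get?_insert _ _ _ _
        have hK' := PySem.Dict.nodup_keys_insert V p s hK
        have h1' : ∀ c v, (V.insert p s).get? c = some v →
            0 ≤ v ∧ v ≤ n ∧ pvReach p0 v.toNat c := by
          intro c v hc
          rw [hget' c] at hc
          by_cases hcp : c = p
          · rw [if_pos hcp] at hc
            cases hc
            exact ⟨hs0, hsn, hcp ▸ hrp⟩
          · rw [if_neg hcp] at hc
            exact h1 c v hc
        apply ih (V.insert p s) st (by have := pvQW_tail_lt n p s st; omega) hK' h1'
          (fun e he => h2 e (List.mem_cons_of_mem _ he)) ?_ ?_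
        · intro c v hc hvn d hop hnb
          rw [hget' c] at hc
          by_cases hcp : c = p
          · rw [if_pos hcp] at hc
            cases hc
            omega
          · rw [if_neg hcp] at hc
            rcases h3 c v hc hvn d hop hnb with ⟨w, hw, hwle⟩ | ⟨t, ht, htle⟩
            · by_cases hdp : d = p
              · have := hfresh w (hdp ▸ hw)
                refine Or.inl ⟨s, ?_, by omega⟩
                rw [hget' d, if_pos hdp]
              · exact Or.inl ⟨w, by rw [hget' d, if_neg hdp]; exact hw, hwle⟩
            · rcases List.mem_cons.1 ht with heq | ht'
              · have hd : d = p := congrArg Prod.fst heq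
                have hts : t = s := congrArg Prod.snd heq
                refine Or.inl ⟨s, ?_, by omega⟩
                rw [hget' d, if_pos hd]
              · exact Or.inr ⟨t, ht', htle⟩
        · rcases h4 with h | h
          · by_cases hpp : p = p0
            · have := hfresh 0 (hpp ▸ h)
              omega
            · exact Or.inl (by rw [hget' p0, if_neg (fun he => hpp he.symm)]; exact h)
          · rcases List.mem_cons.1 h with heq | h'
            · have hp : p0 = p := congrArg Prod.fst heq
              have hs : (0 : Int) = s := congrArg Prod.snd heq
              exact Or.inl (by rw [hget' p0, if_pos hp, ← hs])
            · exact Or.inr h'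

-- a table that is sound, expansion-closed and labels p0 with 0 contains exactly
-- the cells reachable within n steps
theorem pvClosed_keys (p0 : List Int) (n : Int) (hn : 0 ≤ n)
    (F : PySem.Dict (List Int) Int)
    (h1 : ∀ c v, F.get? c = some v → 0 ≤ v ∧ v ≤ n ∧ pvReach p0 v.toNat c)
    (h3 : ∀ c v, F.get? c = some v → v < n → ∀ d, pvOpenCell d = true → d ∈ pvNbrsB c →
      ∃ w, F.get? d = some w ∧ w ≤ v + 1)
    (h4 : F.get? p0 = some 0) :
    ∀ a, a ∈ F.keys ↔ pvReach p0 n.toNat a := by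
  have haux : ∀ k, k ≤ n.toNat → ∀ c, pvReach p0 k c →
      ∃ v, F.get? c = some v ∧ 0 ≤ v ∧ v.toNat ≤ k := by
    intro k
    induction k with
    | zero =>
      intro _ c hc
      exact ⟨0, (show c = p0 from hc) ▸ h4, le_refl 0, by simp⟩
    | succ k ihk =>
      intro hk c hc
      rcases hc with hc | ⟨hop, b, hb, hnb⟩
      · obtain ⟨v, hv, h0, hvk⟩ := ihk (by omega) c hc
        exact ⟨v, hv, h0, by omega⟩
      · obtain ⟨v, hv, h0, hvk⟩ := ihk (by omega) b hb
        have hvn : v < n := by omega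
        obtain ⟨w, hw, hwle⟩ := h3 b v hv hvn c hop hnb
        exact ⟨w, hw, (h1 c w hw).1, by omega⟩
  intro a
  constructor
  · intro ha
    cases hga : F.get? a with
    | none => exact absurd ha ((PySem.Dict.get?_eq_none_iff_not_mem_keys _ _).1 hga)
    | some v =>
      obtain ⟨h0, hvn, hr⟩ := h1 a v hga
      exact pvReach_mono (by omega) hr
  · intro hr
    obtain ⟨v, hv, _, _⟩ := haux n.toNat (le_refl _) a hr
    by_contra hmem
    rw [← PySem.Dict.get?_eq_none_iff_not_mem_keys] at hmem
    rw [hmem] at hv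
    cases hv

-- first-escape lemma: anything reachable from a visited cell is visited or
-- covered by a queue entry with enough remaining budget
theorem pvReach_cover (V : PySem.Dict (List Int) Bool) (q : List (List Int × Int))
    (hP : ∀ v ∈ V.keys, ∀ c, pvOpenCell c = true → c ∈ pvNbrsB v →
      c ∈ V.keys ∨ ∃ s', (c, s') ∈ q) :
    ∀ (K : Nat) (u c : List Int), u ∈ V.keys → pvReach u K c →
      c ∈ V.keys ∨ ∃ e ∈ q, ∃ m, m + 1 ≤ K ∧ pvReach e.1 m c := by
  intro K
  induction K with
  | zero =>
    intro u c hu hc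
    exact Or.inl ((show c = u from hc) ▸ hu)
  | succ K ih =>
    intro u c hu hc
    rcases hc with hc | ⟨hop, b, hb, hnb⟩
    · rcases ih u c hu hc with h | ⟨e, he, m, hm, hr⟩
      · exact Or.inl h
      · exact Or.inr ⟨e, he, m, by omega, hr⟩
    · rcases ih u b hu hb with h | ⟨e, he, m, hm, hr⟩
      · rcases hP b h c hop hnb with h2 | ⟨s', hs'⟩
        · exact Or.inl h2
        · exact Or.inr ⟨(c, s'), hs', 0, by omega, rfl⟩
      · exact Or.inr ⟨e, he, m + 1, by omega, Or.inr ⟨hop, b, hr, hnb⟩⟩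

-- every candidate cell is a two-element list
theorem pvNbrsB_shape {b c : List Int} (h : c ∈ pvNbrsB b) : ∃ x y, c = [x, y] := by
  unfold pvNbrsB at h
  cases b with
  | nil => simp at h
  | cons x t => cases t with
    | nil => simp at h
    | cons y t' =>
      simp at h
      rcases h with h | h | h | h <;> exact ⟨_, _, h⟩

-- on candidate cells 'not a wall' is exactly 'open'
theorem pv_not_wall_iff {b c : List Int} (h : c ∈ pvNbrsB b) :
    pv_is_wall c = false ↔ pvOpenCell c = true := by
  obtain ⟨x, y, rfl⟩ := pvNbrsB_shape h
  rw [pv_is_wall_eq]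
  cases pvOpenCell (x :: y :: ([] : List Int)) <;> simp

theorem pvLoopA_nil (n : Int) (V : PySem.Dict (List Int) Bool) :
    pvLoopA n V [] = V := by
  simp [pvLoopA]

theorem pvLoopA_cons (n : Int) (V : PySem.Dict (List Int) Bool) (p : List Int) (s : Int)
    (q' : List (List Int × Int)) :
    pvLoopA n V ((p, s) :: q') =
      if n ≤ s then pvLoopA n (V.insert p true) q'
      else pvLoopA n (V.insert p true)
        (q' ++ (pvNbrsA p).filterMap (fun np =>
          if ¬ pv_is_wall np = true ∧ ¬ (V.insert p true).contains np = true
          then some (np, s + 1) else none)) := by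
  rw [pvLoopA]

theorem pvLoopA_spec (p0 : List Int) (n : Int) (hn : 0 ≤ n) :
    ∀ (V : PySem.Dict (List Int) Bool) (q : List (List Int × Int)),
    V.keys.Nodup →
    (∀ a ∈ V.keys, pvReach p0 n.toNat a) →
    (∀ e ∈ q, 0 ≤ e.2 ∧ e.2 ≤ n ∧ pvReach p0 e.2.toNat e.1) →
    (∀ c, pvReach p0 n.toNat c → c ∈ V.keys ∨ ∃ e ∈ q, pvReach e.1 (n - e.2).toNat c) →
    (∃ t : Int, (∀ e ∈ q, e.2 = t ∨ e.2 = t + 1) ∧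
        q.Pairwise (fun e f => e.2 ≤ f.2)) →
    (∀ p s q', q = (p, s) :: q' → (n ≤ s ∨
        (∀ v ∈ V.keys, ∀ c, pvOpenCell c = true → c ∈ pvNbrsB v →
          c ∈ V.keys ∨ ∃ s', (c, s') ∈ q))) →
    (pvLoopA n V q).keys.Nodup ∧
    (∀ a, a ∈ (pvLoopA n V q).keys ↔ pvReach p0 n.toNat a) := by
  suffices H : ∀ (M : Nat) (V : PySem.Dict (List Int) Bool) (q : List (List Int × Int)),
      pvQW n q < M →
      V.keys.Nodup →
      (∀ a ∈ V.keys, pvReach p0 n.toNat a) →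
      (∀ e ∈ q, 0 ≤ e.2 ∧ e.2 ≤ n ∧ pvReach p0 e.2.toNat e.1) →
      (∀ c, pvReach p0 n.toNat c → c ∈ V.keys ∨ ∃ e ∈ q, pvReach e.1 (n - e.2).toNat c) →
      (∃ t : Int, (∀ e ∈ q, e.2 = t ∨ e.2 = t + 1) ∧
          q.Pairwise (fun e f => e.2 ≤ f.2)) →
      (∀ p s q', q = (p, s) :: q' → (n ≤ s ∨
          (∀ v ∈ V.keys, ∀ c, pvOpenCell c = true → c ∈ pvNbrsB v →
            c ∈ V.keys ∨ ∃ s', (c, s') ∈ q))) →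
      (pvLoopA n V q).keys.Nodup ∧
      (∀ a, a ∈ (pvLoopA n V q).keys ↔ pvReach p0 n.toNat a) by
    intro V q hK h1 h2 h3 h4 h5
    exact H (pvQW n q + 1) V q (by omega) hK h1 h2 h3 h4 h5
  intro M
  induction M with
  | zero => intro V q h; omega
  | succ M ih =>
    intro V q hM hK h1 h2 h3 h4 h5
    obtain _ | ⟨⟨p, s⟩, q'⟩ := q
    · rw [pvLoopA_nil]
      refine ⟨hK, fun a => ⟨h1 a, fun hr => ?_⟩⟩
      rcases h3 a hr with h | ⟨e, he, _⟩
      · exact h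
      · simp at he
    · obtain ⟨hs0, hsn, hrp⟩ := h2 (p, s) List.mem_cons_self
      have hKD : ((V.insert p true).keys).Nodup := PySem.Dict.nodup_keys_insert _ _ _ hK
      have hmemD : ∀ a : List Int, a ∈ (V.insert p true).keys ↔ a = p ∨ a ∈ V.keys :=
        fun a => PySem.Dict.mem_keys_insert _ _ _ _
      have h1D : ∀ a ∈ (V.insert p true).keys, pvReach p0 n.toNat a := by
        intro a ha
        rcases (hmemD a).1 ha with rfl | h
        · exact pvReach_mono (by omega) hrp
        · exact h1 a h
      obtain ⟨t, hsh, hpw⟩ := h4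
      have hst : s = t ∨ s = t + 1 := hsh (p, s) List.mem_cons_self
      have htail : ∀ e ∈ q', s ≤ e.2 := fun e he => List.rel_of_pairwise_cons hpw he
      rw [pvLoopA_cons]
      split_ifs with hns
      · -- reached the step cutoff: drop the entry
        apply ih (V.insert p true) q'
          (by have := pvQW_tail_lt n p s q'; omega)
          hKD h1D (fun e he => h2 e (List.mem_cons_of_mem _ he)) ?_ ?_ ?_
        · intro c hc
          rcases h3 c hc with h | ⟨e, he, hr⟩
          · exact Or.inl ((hmemD c).2 (Or.inr h))
          · rcases List.mem_cons.1 he with rfl | he'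
            · have hz : (n - s).toNat = 0 := by omega
              rw [hz] at hr
              exact Or.inl ((hmemD c).2 (Or.inl hr))
            · exact Or.inr ⟨e, he', hr⟩
        · exact ⟨t, fun e he => hsh e (List.mem_cons_of_mem _ he), hpw.of_cons⟩
        · intro p₂ s₂ q₂ heq
          left
          have := htail (p₂, s₂) (heq ▸ List.mem_cons_self)
          simp at this
          omega
      · -- expand the popped cell
        have hcontD : ∀ c : List Int,
            (V.insert p true).contains c = false ↔ c ∉ (V.insert p true).keys := by
          intro c
          constructor
          · intro h hc
            rw [(PySem.Dict.contains_iff_mem_keys _ _).2 hc] at h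
            simp at h
          · intro h
            cases hcc : (V.insert p true).contains c
            · rfl
            · exact absurd ((PySem.Dict.contains_iff_mem_keys _ _).1 hcc) h
        have hpush2 : ∀ e ∈ (pvNbrsA p).filterMap (fun np =>
              if ¬ pv_is_wall np = true ∧ ¬ (V.insert p true).contains np = true
              then some (np, s + 1) else none),
            e.2 = s + 1 ∧ e.1 ∈ pvNbrsB p ∧ pvOpenCell e.1 = true ∧
              e.1 ∉ (V.insert p true).keys := by
          intro e he
          rcases List.mem_filterMap.1 he with ⟨np, hnp, hif⟩
          simp at hif
          obtain ⟨⟨hw, hcF⟩, rfl⟩ := hif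
          rw [pvNbrsA_eq] at hnp
          exact ⟨rfl, hnp, (pv_not_wall_iff hnp).1 hw, (hcontD np).1 hcF⟩
        have hpush_of : ∀ c : List Int, c ∈ pvNbrsB p → pvOpenCell c = true →
            c ∉ (V.insert p true).keys →
            (c, s + 1) ∈ (pvNbrsA p).filterMap (fun np =>
              if ¬ pv_is_wall np = true ∧ ¬ (V.insert p true).contains np = true
              then some (np, s + 1) else none) := by
          intro c hnb hop hnk
          refine List.mem_filterMap.2 ⟨c, by rw [pvNbrsA_eq]; exact hnb, ?_⟩
          have hw : pv_is_wall c = false := (pv_not_wall_iff hnb).2 hop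
          have hcF : (V.insert p true).contains c = false := (hcontD c).2 hnk
          simp [hw, hcF]
        have hlen : ((pvNbrsA p).filterMap (fun np =>
              if ¬ pv_is_wall np = true ∧ ¬ (V.insert p true).contains np = true
              then some (np, s + 1) else none)).length ≤ 4 := by
          calc ((pvNbrsA p).filterMap _).length ≤ (pvNbrsA p).length :=
                List.length_filterMap_le _ _
            _ ≤ 4 := by unfold pvNbrsA; cases p with
                | nil => simp
                | cons x tl => cases tl with
                  | nil => simp
                  | cons y tl' => simp
        have hmeas := pvQW_push_lt n p s q' hns _ hlen (fun e he => (hpush2 e he).1)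
        have hq' : ∀ e ∈ q', e.2 = s ∨ e.2 = s + 1 := by
          intro e he
          have h6 := hsh e (List.mem_cons_of_mem _ he)
          have h7 := htail e he
          rcases hst with h | h <;> rcases h6 with h6 | h6 <;> omega
        have hP' : ∀ v ∈ (V.insert p true).keys, ∀ c, pvOpenCell c = true →
            c ∈ pvNbrsB v → c ∈ (V.insert p true).keys ∨
            ∃ s', (c, s') ∈ q' ++ (pvNbrsA p).filterMap (fun np =>
              if ¬ pv_is_wall np = true ∧ ¬ (V.insert p true).contains np = true
              then some (np, s + 1) else none) := by
          intro v hv c hop hnb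
          rcases (hmemD v).1 hv with rfl | hvV
          · by_cases hcD : c ∈ (V.insert v true).keys
            · exact Or.inl hcD
            · exact Or.inr ⟨s + 1, List.mem_append_right _ (hpush_of c hnb hop hcD)⟩
          · rcases h5 p s q' rfl with h | hPold
            · exact absurd h hns
            · rcases hPold v hvV c hop hnb with h | ⟨s', hs'⟩
              · exact Or.inl ((hmemD c).2 (Or.inr h))
              · rcases List.mem_cons.1 hs' with heq | h
                · exact Or.inl ((hmemD c).2 (Or.inl (congrArg Prod.fst heq)))
                · exact Or.inr ⟨s', List.mem_append_left _ h⟩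
        apply ih (V.insert p true) _ (by omega) hKD h1D ?_ ?_ ?_ ?_
        · -- queue entries stay in range and reachable
          intro e he
          rcases List.mem_append.1 he with h | h
          · exact h2 e (List.mem_cons_of_mem _ h)
          · obtain ⟨he2, hnb, hop, _⟩ := hpush2 e h
            refine ⟨by omega, by omega, ?_⟩
            have hidx : e.2.toNat = s.toNat + 1 := by omega
            rw [hidx]
            exact Or.inr ⟨hop, p, hrp, hnb⟩
        · -- coverage
          intro c hc
          rcases h3 c hc with h | ⟨e, he, hr⟩
          · exact Or.inl ((hmemD c).2 (Or.inr h))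
          · rcases List.mem_cons.1 he with rfl | he'
            · rcases pvReach_cover (V.insert p true) _ hP' (n - s).toNat p c
                ((hmemD p).2 (Or.inl rfl)) hr with h | ⟨e2, he2, m, hm, hrm⟩
              · exact Or.inl h
              · refine Or.inr ⟨e2, he2, pvReach_mono ?_ hrm⟩
                have he2s : e2.2 ≤ s + 1 := by
                  rcases List.mem_append.1 he2 with h | h
                  · have := hq' e2 h; omega
                  · have := (hpush2 e2 h).1; omega
                omega
            · exact Or.inr ⟨e, List.mem_append_left _ he', hr⟩
        · -- two-layer shape
          refine ⟨s, ?_, ?_⟩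
          · intro e he
            rcases List.mem_append.1 he with h | h
            · exact hq' e h
            · exact Or.inr (hpush2 e h).1
          · rw [List.pairwise_append]
            refine ⟨hpw.of_cons, ?_, ?_⟩
            · exact List.pairwise_of_forall_mem_list (fun a ha b hb => by
                rw [(hpush2 a ha).1, (hpush2 b hb).1])
            · intro a ha b hb
              rw [(hpush2 b hb).1]
              have := hq' a ha
              omega
        · exact fun _ _ _ _ => Or.inr hP'

-- ===== VERDICT (by name: the statement is the Claim_ definition above) =====
theorem num_locs_spec : Claim_equal_num_locs := by
  intro p0 n _ hpre
  obtain ⟨hn, _⟩ := hpre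
  unfold Spec_num_locs num_locs num_locs_alt
  obtain ⟨hKA, hA⟩ := pvLoopA_spec p0 n hn PySem.Dict.empty [(p0, 0)]
    (by simp [PySem.Dict.keys_empty])
    (by simp [PySem.Dict.keys_empty])
    (by
      intro e he
      simp at he
      subst he
      exact ⟨le_refl 0, hn, rfl⟩)
    (by
      intro c hc
      refine Or.inr ⟨(p0, 0), List.mem_cons_self, ?_⟩
      simpa using hc)
    (⟨0, by simp, List.pairwise_singleton _ _⟩)
    (by
      intro _ _ _ _
      refine Or.inr ?_
      intro v hv
      simp [PySem.Dict.keys_empty] at hv)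
  obtain ⟨hNB, hB1, hB3, hB4⟩ := pvLoopB_spec p0 n (pvQW n [(p0, 0)] + 1)
    PySem.Dict.empty [(p0, 0)]
    (by omega)
    (by simp [PySem.Dict.keys_empty])
    (by intro c v h; rw [PySem.Dict.get?_empty] at h; cases h)
    (by
      intro e he
      simp at he
      subst he
      exact ⟨le_refl 0, hn, rfl⟩)
    (by intro c v h; rw [PySem.Dict.get?_empty] at h; cases h)
    (Or.inr (List.mem_cons_self))
  have hB := pvClosed_keys p0 n hn _ hB1 hB3 hB4
  have hperm : (pvLoopA n PySem.Dict.empty [(p0, 0)]).keys.Perm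
      (pvLoopB n PySem.Dict.empty [(p0, 0)]).keys := by
    rw [List.perm_ext_iff_of_nodup hKA hNB]
    intro a
    rw [hA a, hB a]
  have hlen := hperm.length_eq
  simp only [PySem.Dict.size, PySem.Dict.keys, List.length_map] at *
  omega
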